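-- pv_equiv track=rewrite | github.com/cs-vsu-ru/site-api | parser/app/lessons/services/parser.py | _map_groups
-- ===== SOURCE A (Python) =====
-- def _map_groups(groups_row: list[str]) -> dict[int, tuple[str, int]]:
--     group_map = {}
--     current_group = None
--     current_subgroup = None
--     for column, group in enumerate(groups_row):
--         if column > 1:
--             group = group.strip()
--             if group == current_group:
--                 current_subgroup += 1
--             else:
--                 current_group = group
--                 current_subgroup = 1
--             group_map[column] = current_group, current_subgroup
--     return group_map
-- ===== SOURCE B (Python) =====
-- def _map_groups(groups_row: list[str]) -> dict[int, tuple[str, int]]: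
--     # run-based: split the columns from index 2 on into maximal runs of equal
--     # stripped labels, then number each run's members from 1
--     cols = list(enumerate(groups_row))[2:]
--     group_map = {}
--     i = 0
--     while i < len(cols):
--         key = cols[i][1].strip()
--         j = i + 1
--         while j < len(cols) and cols[j][1].strip() == key:
--             j += 1
--         for position, (column, _) in enumerate(cols[i:j], 1):
--             group_map[column] = (key, position)
--         i = j
--     return group_map
-- ===== Notes on version B (the rewrite author's own statement) =====
-- stated objective: alternative
-- what changed: Replaces the flat scan that threads current_group/current_subgroup state across every column with a run-based decomposition: slice off the first two columns, split the rest into maximal runs of equal stripped labels, and number each run's members by enumerating from 1.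
import Mathlib
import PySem

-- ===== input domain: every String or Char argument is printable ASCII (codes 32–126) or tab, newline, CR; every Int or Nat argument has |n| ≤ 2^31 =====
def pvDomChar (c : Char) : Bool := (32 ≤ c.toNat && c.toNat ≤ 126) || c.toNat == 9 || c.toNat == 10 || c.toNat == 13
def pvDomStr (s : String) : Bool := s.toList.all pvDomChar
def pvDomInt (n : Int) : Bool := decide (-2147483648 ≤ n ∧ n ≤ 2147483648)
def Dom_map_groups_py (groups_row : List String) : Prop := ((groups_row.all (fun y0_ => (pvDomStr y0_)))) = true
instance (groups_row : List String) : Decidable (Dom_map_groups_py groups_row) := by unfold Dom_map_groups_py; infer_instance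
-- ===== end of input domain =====

-- B replaces A's flat stateful scan (current_group/current_subgroup threaded across columns)
-- by a run-splitting decomposition (maximal runs of equal stripped labels, each numbered from 1);
-- the return value is proved equal on all inputs.

-- ===== PORT A =====
-- one loop step of A; state = (group_map, current_group, current_subgroup).
-- current_subgroup starts as None in Python but is only incremented after having been set to 1
-- (`group == current_group` is False while current_group is None), so the initial 0 is never read.
-- In the equal branch Python stores `current_group`, which is `some g` there, so storing g is exact.
def mapGroupsStep (st : PySem.Dict Int (String × Int) × Option String × Int)
    (cg : Int × String) : PySem.Dict Int (String × Int) × Option String × Int :=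
  let (d, curg, curs) := st
  let (column, group) := cg
  if column > 1 then
    let g := PySem.Str.strip group
    if (some g == curg) then (d.insert column (g, curs + 1), curg, curs + 1)
    else (d.insert column (g, 1), some g, 1)
  else st

def map_groups_py (groups_row : List String) : List (Int × String × Int) :=
  ((PySem.List.enumerate groups_row).foldl mapGroupsStep
    (PySem.Dict.empty, none, 0)).1.items

-- ===== PORT B =====
-- inner loop of B: for position, (column, _) in enumerate(cols[:n], 1): group_map[column] = (key, position)
def bNumber (key : String) (run : List (Int × String))
    (d : PySem.Dict Int (String × Int)) : PySem.Dict Int (String × Int) :=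
  (PySem.List.enumerate run 1).foldl (fun d pq => d.insert pq.2.1 (key, pq.1)) d


-- outer while loop of B: the index scan `j = i + 1; while j < len(cols) and cols[j][1].strip() == key`
-- finds the maximal run cols[i:j] of equal stripped labels (cols[i] satisfies the test trivially),
-- i.e. exactly takeWhile / dropWhile of the remaining columns; number the run, continue at i = j.
def bRuns : List (Int × String) → PySem.Dict Int (String × Int) → PySem.Dict Int (String × Int)
  | [], d => d
  | x :: rest, d =>
    bRuns ((x :: rest).dropWhile (fun q => PySem.Str.strip q.2 == PySem.Str.strip x.2))
      (bNumber (PySem.Str.strip x.2)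
        ((x :: rest).takeWhile (fun q => PySem.Str.strip q.2 == PySem.Str.strip x.2)) d)
  termination_by l _ => l.length
  decreasing_by
    simp only [List.dropWhile_cons, beq_self_eq_true, if_true]
    exact Nat.lt_succ_of_le (List.length_dropWhile_le _ _)


def map_groups_py_alt (groups_row : List String) : List (Int × String × Int) :=
  (bRuns (PySem.List.slice (PySem.List.enumerate groups_row) (some 2) none)
    PySem.Dict.empty).items

-- ===== PRECONDITION & SPEC =====
def Spec_map_groups_py (groups_row : List String) (out : List (Int × String × Int)) : Prop := out = map_groups_py_alt groups_row
instance (groups_row : List String) (out : List (Int × String × Int)) : Decidable (Spec_map_groups_py groups_row out) := by unfold Spec_map_groups_py; infer_instance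

-- ===== CLAIM (what is proved, stated in full; the proofs are below) =====
def Claim_equal_map_groups_py : Prop := ∀ (groups_row : List String), Dom_map_groups_py groups_row → Spec_map_groups_py groups_row (map_groups_py groups_row)

-- ===== LEMMAS AND PROOFS =====

-- what both programs emit for a trailing column list (all columns > 1), in A's flat-scan shape
def cont (cg : Option String) (k : Int) : List (Int × String) → List (Int × String × Int)
  | [] => []
  | (c, s) :: rest =>
    let g := PySem.Str.strip s
    if some g = cg then (c, g, k + 1) :: cont cg (k + 1) rest
    else (c, g, 1) :: cont (some g) 1 rest

theorem foldA_items (xs : List (Int × String)) :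
    ∀ (d : PySem.Dict Int (String × Int)) (cg : Option String) (k : Int),
    (∀ p ∈ xs, (1:Int) < p.1) → (∀ p ∈ xs, p.1 ∉ d.keys) → (xs.map Prod.fst).Nodup →
    (xs.foldl mapGroupsStep (d, cg, k)).1.items = d.items ++ cont cg k xs := by
  induction xs with
  | nil => intro d cg k _ _ _; simp [cont]
  | cons hd tl ih =>
    intro d cg k hgt hfresh hnd
    obtain ⟨c, s⟩ := hd
    have hc : (1:Int) < c := hgt (c, s) (by simp)
    have hcd : c ∉ d.keys := hfresh (c, s) (by simp)
    have hcontains : d.contains c = false := by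
      rw [PySem.Dict.contains_eq_decide_mem_keys]; simpa using hcd
    have hndtl : (tl.map Prod.fst).Nodup := by simp at hnd; exact hnd.2
    have hcnot : ∀ p ∈ tl, p.1 ≠ c := by
      rw [List.map_cons, List.nodup_cons] at hnd
      intro p hp h
      have hm : p.1 ∈ tl.map Prod.fst := List.mem_map_of_mem (f := Prod.fst) hp
      rw [h] at hm
      exact hnd.1 hm
    simp only [List.foldl_cons, cont]
    by_cases heq : some (PySem.Str.strip s) = cg
    · have hstep : mapGroupsStep (d, cg, k) (c, s)
          = (d.insert c (PySem.Str.strip s, k + 1), cg, k + 1) := by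
        simp [mapGroupsStep, hc, heq]
      rw [hstep, ih _ _ _ (fun p hp => hgt p (by simp [hp]))
        (by intro p hp
            rw [PySem.Dict.mem_keys_insert]
            rintro (h | h)
            · exact hcnot p hp h
            · exact hfresh p (by simp [hp]) h) hndtl]
      rw [PySem.Dict.items_insert_of_not_contains _ _ hcontains]
      simp [heq]
    · have hstep : mapGroupsStep (d, cg, k) (c, s)
          = (d.insert c (PySem.Str.strip s, 1), some (PySem.Str.strip s), 1) := by
        simp [mapGroupsStep, hc]
        intro h; exact absurd (by simp [h]) heq
      rw [hstep, ih _ _ _ (fun p hp => hgt p (by simp [hp]))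
        (by intro p hp
            rw [PySem.Dict.mem_keys_insert]
            rintro (h | h)
            · exact hcnot p hp h
            · exact hfresh p (by simp [hp]) h) hndtl]
      rw [PySem.Dict.items_insert_of_not_contains _ _ hcontains]
      simp [heq]

theorem cont_matching (key : String) (run : List (Int × String))
    (hrun : ∀ q ∈ run, PySem.Str.strip q.2 = key) :
    ∀ (rest' : List (Int × String)) (j : Int),
    cont (some key) j (run ++ rest')
      = (PySem.List.enumerate run (j + 1)).map (fun pq => (pq.2.1, key, pq.1))
        ++ cont (some key) (j + run.length) rest' := by
  induction run with
  | nil => intro rest' j; simp [PySem.List.enumerate_nil]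
  | cons q run ih =>
    intro rest' j
    obtain ⟨c, s⟩ := q
    have hk : PySem.Str.strip s = key := hrun (c, s) (by simp)
    simp only [List.cons_append, cont, hk]
    rw [PySem.List.enumerate_cons]
    have := ih (fun q hq => hrun q (by simp [hq])) rest' (j + 1)
    rw [this, if_pos trivial]
    simp only [List.length_cons]
    have harith : j + 1 + (run.length : Int) = j + ((run.length + 1 : Nat) : Int) := by
      push_cast; ring
    rw [harith]
    simp

theorem cont_shift (key : String) (m : Int) (ys : List (Int × String))
    (h : ∀ c s t, ys = (c, s) :: t → PySem.Str.strip s ≠ key) :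
    cont (some key) m ys = cont none 0 ys := by
  cases ys with
  | nil => rfl
  | cons q t =>
    obtain ⟨c, s⟩ := q
    have hne : PySem.Str.strip s ≠ key := h c s t rfl
    simp only [cont]
    rw [if_neg (by simpa using hne), if_neg (by simp)]

theorem bNumber_items (key : String) (run : List (Int × String))
    (d : PySem.Dict Int (String × Int))
    (hfresh : ∀ p ∈ run, p.1 ∉ d.keys) (hnd : (run.map Prod.fst).Nodup) :
    (bNumber key run d).items
      = d.items ++ (PySem.List.enumerate run 1).map (fun pq => (pq.2.1, (key, pq.1))) := by
  unfold bNumber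
  rw [PySem.Dict.items_foldl_insert_fresh]
  · intro a ha
    have : a.2 ∈ run := by
      have := List.mem_map_of_mem (f := fun x : Int × (Int × String) => x.2) ha
      rwa [PySem.List.map_snd_enumerate] at this
    rw [PySem.Dict.contains_eq_decide_mem_keys]
    simpa using hfresh a.2 this
  · have : (PySem.List.enumerate run 1).map (fun pq => pq.2.1)
        = run.map Prod.fst := by
      rw [show (fun pq : Int × (Int × String) => pq.2.1) = (Prod.fst ∘ fun pq : Int × (Int × String) => pq.2) from rfl,
        ← List.map_map, PySem.List.map_snd_enumerate]
    rw [this]; exact hnd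

theorem map_fst_enum_map (key : String) (run : List (Int × String)) :
    ((PySem.List.enumerate run 1).map
        (fun pq : Int × (Int × String) => (pq.2.1, (key, pq.1)))).map Prod.fst
      = run.map Prod.fst := by
  rw [List.map_map,
    show (Prod.fst ∘ fun pq : Int × (Int × String) => (pq.2.1, (key, pq.1)))
      = (Prod.fst ∘ fun pq : Int × (Int × String) => pq.2) from rfl,
    ← List.map_map, PySem.List.map_snd_enumerate]

set_option maxHeartbeats 1600000 in
theorem bRuns_items (cols : List (Int × String)) (d : PySem.Dict Int (String × Int))
    (hfresh : ∀ p ∈ cols, p.1 ∉ d.keys) (hnd : (cols.map Prod.fst).Nodup) :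
    (bRuns cols d).items = d.items ++ cont none 0 cols := by
  revert hfresh hnd
  induction cols, d using bRuns.induct with
  | case1 d' => simp [bRuns, cont]
  | case2 x rest d' ih =>
    intro hfresh hnd
    obtain ⟨c, s⟩ := x
    have hsplit :
        ((c, s) :: rest).takeWhile (fun q => PySem.Str.strip q.2 == PySem.Str.strip s)
          ++ ((c, s) :: rest).dropWhile (fun q => PySem.Str.strip q.2 == PySem.Str.strip s)
        = (c, s) :: rest := List.takeWhile_append_dropWhile
    have hrunall : ∀ q ∈ ((c, s) :: rest).takeWhile (fun q => PySem.Str.strip q.2 == PySem.Str.strip s),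
        PySem.Str.strip q.2 = PySem.Str.strip s := by
      intro q hq
      simpa using List.mem_takeWhile_imp hq
    have hrunsub := List.takeWhile_sublist (l := (c, s) :: rest)
      (fun q => PySem.Str.strip q.2 == PySem.Str.strip s)
    have hdropsub := List.dropWhile_sublist (l := (c, s) :: rest)
      (fun q => PySem.Str.strip q.2 == PySem.Str.strip s)
    have hnd2 : ((((c, s) :: rest).takeWhile (fun q => PySem.Str.strip q.2 == PySem.Str.strip s)).map Prod.fst
        ++ (((c, s) :: rest).dropWhile (fun q => PySem.Str.strip q.2 == PySem.Str.strip s)).map Prod.fst).Nodup := by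
      rw [← List.map_append, hsplit]; exact hnd
    have hdisj := (List.nodup_append.mp hnd2).2.2
    have hfreshrun : ∀ q ∈ ((c, s) :: rest).takeWhile (fun q => PySem.Str.strip q.2 == PySem.Str.strip s),
        q.1 ∉ d'.keys := fun q hq => hfresh q (hrunsub.mem hq)
    have hkeys : (bNumber (PySem.Str.strip s)
        (((c, s) :: rest).takeWhile (fun q => PySem.Str.strip q.2 == PySem.Str.strip s)) d').keys
        = d'.keys ++ (((c, s) :: rest).takeWhile (fun q => PySem.Str.strip q.2 == PySem.Str.strip s)).map Prod.fst := by
      simp only [PySem.Dict.keys,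
        bNumber_items _ _ _ hfreshrun ((List.nodup_append.mp hnd2).1), List.map_append,
        map_fst_enum_map]
    have ihres := ih (by
        intro q hq
        rw [hkeys, List.mem_append]
        rintro (h | h)
        · exact hfresh q (hdropsub.mem hq) h
        · exact hdisj q.1 h q.1 (List.mem_map_of_mem (f := Prod.fst) hq) rfl)
      (by
        exact (List.nodup_append.mp hnd2).2.1)
    rw [bRuns, ihres, bNumber_items _ _ _ hfreshrun ((List.nodup_append.mp hnd2).1), List.append_assoc]
    congr 1
    -- remaining: mapped run ++ cont none 0 rest' = cont none 0 ((c,s)::rest)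
    have hrun_eq : ((c, s) :: rest).takeWhile (fun q => PySem.Str.strip q.2 == PySem.Str.strip s)
        = (c, s) :: rest.takeWhile (fun q => PySem.Str.strip q.2 == PySem.Str.strip s) := by
      simp
    have hrest_eq : ((c, s) :: rest).dropWhile (fun q => PySem.Str.strip q.2 == PySem.Str.strip s)
        = rest.dropWhile (fun q => PySem.Str.strip q.2 == PySem.Str.strip s) := by
      simp
    have hmatch := cont_matching (PySem.Str.strip s)
      (rest.takeWhile (fun q => PySem.Str.strip q.2 == PySem.Str.strip s))
      (by intro q hq; simpa using List.mem_takeWhile_imp hq)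
      (rest.dropWhile (fun q => PySem.Str.strip q.2 == PySem.Str.strip s)) 1
    have hshift : cont (some (PySem.Str.strip s))
        (1 + (rest.takeWhile (fun q => PySem.Str.strip q.2 == PySem.Str.strip s)).length)
        (rest.dropWhile (fun q => PySem.Str.strip q.2 == PySem.Str.strip s))
        = cont none 0 (rest.dropWhile (fun q => PySem.Str.strip q.2 == PySem.Str.strip s)) := by
      apply cont_shift
      intro c' s' t' heq
      have hhead := List.head_dropWhile_not (l := rest)
        (fun q => PySem.Str.strip q.2 == PySem.Str.strip s) (by simp [heq])
      simp only [heq, List.head_cons] at hhead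
      simpa using hhead
    conv_rhs => rw [show cont none 0 ((c, s) :: rest)
        = (c, PySem.Str.strip s, 1) :: cont (some (PySem.Str.strip s)) 1 rest from by
          simp [cont]]
    conv_rhs => rw [show rest = rest.takeWhile (fun q => PySem.Str.strip q.2 == PySem.Str.strip s)
        ++ rest.dropWhile (fun q => PySem.Str.strip q.2 == PySem.Str.strip s) from
        (List.takeWhile_append_dropWhile).symm]
    rw [hmatch, hshift, hrun_eq, hrest_eq, PySem.List.enumerate_cons]
    simp

theorem enum_gt (r : List String) (p : Int × String) (hp : p ∈ PySem.List.enumerate r 2) :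
    (1:Int) < p.1 := by
  rw [PySem.List.mem_enumerate_iff] at hp
  obtain ⟨k, hk, rfl⟩ := hp
  simp; omega

theorem main_eq (groups_row : List String) :
    map_groups_py groups_row = map_groups_py_alt groups_row := by
  unfold map_groups_py map_groups_py_alt
  rw [show (2:Int) = ((2:Nat):Int) from by norm_num, PySem.List.slice_from_natCast]
  match groups_row with
  | [] => simp [PySem.List.enumerate_nil, bRuns]
  | [a] => simp [PySem.List.enumerate_cons, PySem.List.enumerate_nil, mapGroupsStep, bRuns]
  | a :: b :: r =>
    rw [PySem.List.enumerate_cons, PySem.List.enumerate_cons]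
    norm_num
    rw [show mapGroupsStep (PySem.Dict.empty, none, 0) (0, a) = (PySem.Dict.empty, none, 0) from by
        simp [mapGroupsStep],
      show mapGroupsStep (PySem.Dict.empty, none, 0) (1, b) = (PySem.Dict.empty, none, 0) from by
        simp [mapGroupsStep],
      foldA_items _ _ _ _ (enum_gt r) (by simp [PySem.Dict.keys_empty]) (by
        have := PySem.List.pairwise_lt_enumerate r 2
        exact (List.pairwise_map.mpr (this.imp fun h => ne_of_lt h))),
      bRuns_items _ _ (by simp [PySem.Dict.keys_empty]) (by
        have := PySem.List.pairwise_lt_enumerate r 2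
        exact (List.pairwise_map.mpr (this.imp fun h => ne_of_lt h)))]

-- ===== VERDICT (by name: the statement is the Claim_ definition above) =====
theorem map_groups_py_spec : Claim_equal_map_groups_py := by
  intro groups_row _
  unfold Spec_map_groups_py
  exact main_eq groups_row
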